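-- pv_equiv track=rewrite | github.com/darthrootbeer/house-hunt-hero | generate_town_page.py | places_html
-- ===== SOURCE A (Python) =====
-- PLACE_CATEGORIES = [
--     # Creative Culture
--     ("bookstores",          "Bookstores",             "creative_culture"),
--     ("record_stores",       "Record Stores",           "creative_culture"),
--     ("music_venues",        "Music Venues",            "creative_culture"),
--     ("art_galleries",       "Art Galleries",           "creative_culture"),
--     ("indie_cinema",        "Independent Cinemas",     "creative_culture"),
--     # Nature Access
--     ("outdoor_outfitters",  "Outdoor Outfitters",      "nature_access"),
--     ("kayak_canoe_rental",  "Kayak / Canoe Rentals",   "nature_access"),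
--     ("ski_areas",           "Ski Areas",               "nature_access"),
--     # Food & Drink
--     ("coffee_shops",        "Coffee Shops",            "food_drink"),
--     ("restaurants",         "Restaurants",             "food_drink"),
--     ("farmers_markets",     "Farmers Markets",         "food_drink"),
--     ("breweries",           "Breweries / Taprooms",    "food_drink"),
--     # Community Fit
--     ("libraries",           "Libraries",               "community_fit"),
--     ("yoga_studios",        "Yoga Studios",            "community_fit"),
--     ("coworking_spaces",    "Coworking Spaces",        "community_fit"),
--     # Pet Friendly
--     ("vet_clinics",         "Vet Clinics",             "pet_friendly"),
--     ("pet_grooming",        "Pet Groomers",            "pet_friendly"),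
--     ("pet_boarding",        "Pet Boarding / Kennels",   "pet_friendly"),
--     ("pet_supply",          "Pet Supply Stores",        "pet_friendly"),
--     ("animal_shelters",     "Animal Shelters",          "pet_friendly"),
--     # Practical
--     ("grocery_stores",      "Grocery Stores",           "practical"),
--     ("hardware_stores",     "Hardware Stores",          "practical"),
--     ("farm_supply",         "Farm & Feed Supply",       "practical"),
--     ("urgent_care",         "Urgent Care / Medical",    "practical"),
-- ]
--
-- VIBE_GROUP_LABELS = {
--     "creative_culture": "Creative Culture",
--     "nature_access": "Nature Access",
--     "food_drink": "Food & Drink",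
--     "community_fit": "Community Fit",
--     "pet_friendly": "Pet Friendly",
--     "practical": "Practical",
-- }
--
-- VIBE_GROUP_ORDER = ["creative_culture", "nature_access", "food_drink",
--                     "community_fit", "pet_friendly", "practical"]
--
-- def places_html(places):
--     """Render named places with sources, grouped by vibe dimension."""
--     if not places:
--         return '<div class="places-empty">No place data yet.</div>'
--
--     # Group categories by vibe dimension
--     groups = {v: [] for v in VIBE_GROUP_ORDER}
--     for key, heading, vibe_dim in PLACE_CATEGORIES:
--         groups.setdefault(vibe_dim, []).append((key, heading))
--
--     html_parts = []
--     for vibe_dim in VIBE_GROUP_ORDER: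
--         cats = groups.get(vibe_dim, [])
--         if not cats:
--             continue
--         group_label = VIBE_GROUP_LABELS.get(vibe_dim, vibe_dim)
--         cat_blocks = []
--         for key, heading in cats:
--             items = places.get(key, [])
--             count = len(items)
--             cls = "cat-present" if count > 0 else "cat-absent"
--             header = f'<span class="cat-name">{heading}</span><span class="cat-count">{count}</span>'
--             if items:
--                 rows = ""
--                 for p in items:
--                     source = p.get("source", "")
--                     source_html = f'<span class="place-source">source: {source}</span>' if source else ""
--                     rows += f'<div class="place-row"><span class="place-name">{p["name"]}</span>{source_html}</div>'
--                 cat_blocks.append(f'<details class="cat-block"><summary class="cat-header {cls}">{header}</summary>{rows}</details>')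
--             else:
--                 cat_blocks.append(f'<details class="cat-block"><summary class="cat-header {cls}">{header}</summary><div class="place-row place-none">None found</div></details>')
--         html_parts.append(
--             f'<div class="places-group">'
--             f'<div class="places-group-label">{group_label}</div>'
--             f'{"".join(cat_blocks)}'
--             f'</div>'
--         )
--     return f'<div class="places-list">{"".join(html_parts)}</div>'
-- ===== SOURCE B (Python) =====
-- PLACE_CATEGORIES = [
--     ("bookstores",          "Bookstores",             "creative_culture"),
--     ("record_stores",       "Record Stores",           "creative_culture"),
--     ("music_venues",        "Music Venues",            "creative_culture"),
--     ("art_galleries",       "Art Galleries",           "creative_culture"),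
--     ("indie_cinema",        "Independent Cinemas",     "creative_culture"),
--     ("outdoor_outfitters",  "Outdoor Outfitters",      "nature_access"),
--     ("kayak_canoe_rental",  "Kayak / Canoe Rentals",   "nature_access"),
--     ("ski_areas",           "Ski Areas",               "nature_access"),
--     ("coffee_shops",        "Coffee Shops",            "food_drink"),
--     ("restaurants",         "Restaurants",             "food_drink"),
--     ("farmers_markets",     "Farmers Markets",         "food_drink"),
--     ("breweries",           "Breweries / Taprooms",    "food_drink"),
--     ("libraries",           "Libraries",               "community_fit"),
--     ("yoga_studios",        "Yoga Studios",            "community_fit"),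
--     ("coworking_spaces",    "Coworking Spaces",        "community_fit"),
--     ("vet_clinics",         "Vet Clinics",             "pet_friendly"),
--     ("pet_grooming",        "Pet Groomers",            "pet_friendly"),
--     ("pet_boarding",        "Pet Boarding / Kennels",   "pet_friendly"),
--     ("pet_supply",          "Pet Supply Stores",        "pet_friendly"),
--     ("animal_shelters",     "Animal Shelters",          "pet_friendly"),
--     ("grocery_stores",      "Grocery Stores",           "practical"),
--     ("hardware_stores",     "Hardware Stores",          "practical"),
--     ("farm_supply",         "Farm & Feed Supply",       "practical"),
--     ("urgent_care",         "Urgent Care / Medical",    "practical"),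
-- ]
--
-- VIBE_GROUP_LABELS = {
--     "creative_culture": "Creative Culture",
--     "nature_access": "Nature Access",
--     "food_drink": "Food & Drink",
--     "community_fit": "Community Fit",
--     "pet_friendly": "Pet Friendly",
--     "practical": "Practical",
-- }
--
-- VIBE_GROUP_ORDER = ["creative_culture", "nature_access", "food_drink",
--                     "community_fit", "pet_friendly", "practical"]
--
--
-- def _place_row(p):
--     source = p.get("source", "")
--     src = f'<span class="place-source">source: {source}</span>' if source else ""
--     return f'<div class="place-row"><span class="place-name">{p["name"]}</span>{src}</div>'
--
--
-- def _cat_block(places, key, heading):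
--     items = places.get(key, [])
--     cls = "cat-present" if items else "cat-absent"
--     header = f'<span class="cat-name">{heading}</span><span class="cat-count">{len(items)}</span>'
--     body = ("".join(_place_row(p) for p in items) if items
--             else '<div class="place-row place-none">None found</div>')
--     return f'<details class="cat-block"><summary class="cat-header {cls}">{header}</summary>{body}</details>'
--
--
-- def _group_block(places, vibe_dim):
--     cats = [(k, h) for k, h, v in PLACE_CATEGORIES if v == vibe_dim]
--     if not cats:
--         return ""
--     label = VIBE_GROUP_LABELS.get(vibe_dim, vibe_dim)
--     blocks = "".join(_cat_block(places, k, h) for k, h in cats)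
--     return f'<div class="places-group"><div class="places-group-label">{label}</div>{blocks}</div>'
--
--
-- def places_html(places):
--     """Render named places with sources, grouped by vibe dimension."""
--     if not places:
--         return '<div class="places-empty">No place data yet.</div>'
--     return '<div class="places-list">' + "".join(_group_block(places, v) for v in VIBE_GROUP_ORDER) + '</div>'
-- ===== Notes on version B (the rewrite author's own statement) =====
-- stated objective: simpler
-- what changed: Drops A's pre-built vibe->categories index dict (dict comprehension + setdefault/append grouping pass) and instead filters PLACE_CATEGORIES per vibe dimension on the fly, assembling the HTML with small helper functions and ''.join over maps instead of A's accumulator loops.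
import Mathlib
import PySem

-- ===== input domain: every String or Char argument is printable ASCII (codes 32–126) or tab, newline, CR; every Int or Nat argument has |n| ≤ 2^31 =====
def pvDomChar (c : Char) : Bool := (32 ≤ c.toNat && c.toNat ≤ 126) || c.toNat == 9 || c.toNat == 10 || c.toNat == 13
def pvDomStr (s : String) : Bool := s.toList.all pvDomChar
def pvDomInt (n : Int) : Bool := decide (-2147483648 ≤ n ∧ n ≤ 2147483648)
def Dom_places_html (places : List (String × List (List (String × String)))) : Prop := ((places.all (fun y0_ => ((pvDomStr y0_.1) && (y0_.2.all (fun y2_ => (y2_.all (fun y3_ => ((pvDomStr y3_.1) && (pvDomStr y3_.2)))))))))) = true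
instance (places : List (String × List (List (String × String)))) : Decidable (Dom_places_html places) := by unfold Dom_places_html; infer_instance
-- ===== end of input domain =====

-- B replaces A's pre-built vibe→categories index dict with an on-the-fly filter of
-- PLACE_CATEGORIES per vibe dimension and renders via helper functions + join instead of
-- accumulator loops (objective: simpler); same output bytes.

-- module constants shared by both programs
def placeCategories : List (String × String × String) :=
  [ ("bookstores",          "Bookstores",             "creative_culture"),
    ("record_stores",       "Record Stores",           "creative_culture"),
    ("music_venues",        "Music Venues",            "creative_culture"),
    ("art_galleries",       "Art Galleries",           "creative_culture"),
    ("indie_cinema",        "Independent Cinemas",     "creative_culture"),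
    ("outdoor_outfitters",  "Outdoor Outfitters",      "nature_access"),
    ("kayak_canoe_rental",  "Kayak / Canoe Rentals",   "nature_access"),
    ("ski_areas",           "Ski Areas",               "nature_access"),
    ("coffee_shops",        "Coffee Shops",            "food_drink"),
    ("restaurants",         "Restaurants",             "food_drink"),
    ("farmers_markets",     "Farmers Markets",         "food_drink"),
    ("breweries",           "Breweries / Taprooms",    "food_drink"),
    ("libraries",           "Libraries",               "community_fit"),
    ("yoga_studios",        "Yoga Studios",            "community_fit"),
    ("coworking_spaces",    "Coworking Spaces",        "community_fit"),
    ("vet_clinics",         "Vet Clinics",             "pet_friendly"),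
    ("pet_grooming",        "Pet Groomers",            "pet_friendly"),
    ("pet_boarding",        "Pet Boarding / Kennels",   "pet_friendly"),
    ("pet_supply",          "Pet Supply Stores",        "pet_friendly"),
    ("animal_shelters",     "Animal Shelters",          "pet_friendly"),
    ("grocery_stores",      "Grocery Stores",           "practical"),
    ("hardware_stores",     "Hardware Stores",          "practical"),
    ("farm_supply",         "Farm & Feed Supply",       "practical"),
    ("urgent_care",         "Urgent Care / Medical",    "practical") ]

def vibeGroupLabels : List (String × String) :=
  [ ("creative_culture", "Creative Culture"),
    ("nature_access", "Nature Access"),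
    ("food_drink", "Food & Drink"),
    ("community_fit", "Community Fit"),
    ("pet_friendly", "Pet Friendly"),
    ("practical", "Practical") ]

def vibeGroupOrder : List String :=
  ["creative_culture", "nature_access", "food_drink",
   "community_fit", "pet_friendly", "practical"]

-- ===== PORT A =====
-- A's groups dict (a closed computation: it does not depend on `places`):
-- groups = {v: [] for v in VIBE_GROUP_ORDER}; then setdefault(vibe_dim, []).append((key, heading)),
-- which is g[v] = g.get(v, []) + [(key, heading)]  =  Dict.modify v [] (· ++ [(key, heading)]).
def groupsA : PySem.Dict String (List (String × String)) :=
  placeCategories.foldl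
    (fun g t => g.modify t.2.2 [] (fun l => l ++ [(t.1, t.2.1)]))
    (vibeGroupOrder.foldl (fun g v => g.insert v []) PySem.Dict.empty)

-- body of A's `for p in items` loop (rows += f'...'); p["name"] is exact under Pre_ (KeyError excluded)
def aRowStep (rows : String) (p : List (String × String)) : String :=
  let source := (PySem.Dict.mk p).getD "source" ""
  let sourceHtml := if source ≠ "" then "<span class=\"place-source\">source: " ++ source ++ "</span>" else ""
  rows ++ "<div class=\"place-row\"><span class=\"place-name\">" ++ (PySem.Dict.mk p).getD "name" "" ++ "</span>" ++ sourceHtml ++ "</div>"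

-- body of A's `for key, heading in cats` loop (cat_blocks.append(...))
def aCatStep (places : List (String × List (List (String × String)))) (blocks : List String) (kh : String × String) : List String :=
  let items := (PySem.Dict.mk places).getD kh.1 []
  let count : Int := (items.length : Int)
  let cls := if count > 0 then "cat-present" else "cat-absent"
  let header := "<span class=\"cat-name\">" ++ kh.2 ++ "</span><span class=\"cat-count\">" ++ PySem.Int.toStr count ++ "</span>"
  if items ≠ [] then
    let rows := items.foldl aRowStep ""
    blocks ++ ["<details class=\"cat-block\"><summary class=\"cat-header " ++ cls ++ "\">" ++ header ++ "</summary>" ++ rows ++ "</details>"]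
  else
    blocks ++ ["<details class=\"cat-block\"><summary class=\"cat-header " ++ cls ++ "\">" ++ header ++ "</summary><div class=\"place-row place-none\">None found</div></details>"]

-- body of A's `for vibe_dim in VIBE_GROUP_ORDER` loop (continue / html_parts.append(...))
def aGroupStep (places : List (String × List (List (String × String)))) (parts : List String) (vibe : String) : List String :=
  let cats := groupsA.getD vibe []
  if cats = [] then parts
  else
    let groupLabel := (PySem.Dict.mk vibeGroupLabels).getD vibe vibe
    let catBlocks := cats.foldl (aCatStep places) []
    parts ++ ["<div class=\"places-group\"><div class=\"places-group-label\">" ++ groupLabel ++ "</div>" ++ PySem.Str.join "" catBlocks ++ "</div>"]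

def places_html (places : List (String × List (List (String × String)))) : String :=
  if places = [] then "<div class=\"places-empty\">No place data yet.</div>"
  else
    let htmlParts := vibeGroupOrder.foldl (aGroupStep places) []
    "<div class=\"places-list\">" ++ PySem.Str.join "" htmlParts ++ "</div>"

-- ===== PORT B =====
def placeRow (p : List (String × String)) : String :=
  let source := (PySem.Dict.mk p).getD "source" ""
  let src := if source ≠ "" then "<span class=\"place-source\">source: " ++ source ++ "</span>" else ""
  "<div class=\"place-row\"><span class=\"place-name\">" ++ (PySem.Dict.mk p).getD "name" "" ++ "</span>" ++ src ++ "</div>"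

def catBlock (places : List (String × List (List (String × String)))) (key heading : String) : String :=
  let items := (PySem.Dict.mk places).getD key []
  let cls := if items ≠ [] then "cat-present" else "cat-absent"
  let header := "<span class=\"cat-name\">" ++ heading ++ "</span><span class=\"cat-count\">" ++ PySem.Int.toStr (items.length : Int) ++ "</span>"
  let body := if items ≠ [] then PySem.Str.join "" (items.map placeRow)
              else "<div class=\"place-row place-none\">None found</div>"
  "<details class=\"cat-block\"><summary class=\"cat-header " ++ cls ++ "\">" ++ header ++ "</summary>" ++ body ++ "</details>"

def groupBlock (places : List (String × List (List (String × String)))) (vibe : String) : String :=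
  let cats := (placeCategories.filter (fun t => t.2.2 == vibe)).map (fun t => (t.1, t.2.1))
  if cats = [] then ""
  else
    let label := (PySem.Dict.mk vibeGroupLabels).getD vibe vibe
    let blocks := PySem.Str.join "" (cats.map (fun kh => catBlock places kh.1 kh.2))
    "<div class=\"places-group\"><div class=\"places-group-label\">" ++ label ++ "</div>" ++ blocks ++ "</div>"

def places_html_alt (places : List (String × List (List (String × String)))) : String :=
  if places = [] then "<div class=\"places-empty\">No place data yet.</div>"
  else "<div class=\"places-list\">" ++ PySem.Str.join "" (vibeGroupOrder.map (groupBlock places)) ++ "</div>"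

-- ===== PRECONDITION & SPEC =====
-- Pre_ excludes exactly the inputs where Python A raises KeyError: a place dict listed under one
-- of the fixed category keys that has no "name" key.
def Pre_places_html (places : List (String × List (List (String × String)))) : Prop :=
  ∀ k ∈ placeCategories.map (fun t => t.1),
    ∀ p ∈ (PySem.Dict.mk places).getD k [], ((PySem.Dict.mk p).get? "name").isSome

instance (places : List (String × List (List (String × String)))) : Decidable (Pre_places_html places) := by
  unfold Pre_places_html; infer_instance

def pvWitness_places_html : (List (String × List (List (String × String)))) :=
  [("coffee_shops", [[("name", "Brew Lab"), ("source", "osm")], [("name", "Java House")]]),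
   ("libraries", [])]

def Spec_places_html (places : List (String × List (List (String × String)))) (out : String) : Prop :=
  out = places_html_alt places

instance (places : List (String × List (List (String × String)))) (out : String) : Decidable (Spec_places_html places out) := by
  unfold Spec_places_html; infer_instance

-- ===== CLAIM =====
def Claim_equal_places_html : Prop :=
  ∀ (places : List (String × List (List (String × String)))),
    Dom_places_html places → Pre_places_html places → Spec_places_html places (places_html places)

-- ===== LEMMAS AND PROOFS =====

-- "".join on String level: nil and cons
theorem joinE_nil : PySem.Str.join "" ([] : List String) = "" := rfl

theorem joinE_cons (x : String) (xs : List String) :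
    PySem.Str.join "" (x :: xs) = x ++ PySem.Str.join "" xs := by
  have h : (PySem.Str.join "" (x :: xs)).toList = (x ++ PySem.Str.join "" xs).toList := by
    cases xs with
    | nil => simp [PySem.Str.toList_join, PySem.Chars.join_singleton, PySem.Chars.join_nil]
    | cons y ys => simp [PySem.Str.toList_join, PySem.Chars.join_cons_cons]
  exact String.toList_inj.mp h

-- A's rows loop equals B's join-of-rendered-rows
theorem rows_eq (items : List (List (String × String))) :
    ∀ s : String, items.foldl aRowStep s = s ++ PySem.Str.join "" (items.map placeRow) := by
  induction items with
  | nil => intro s; simp [joinE_nil]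
  | cons p ps ih =>
      intro s
      simp only [List.foldl_cons, List.map_cons, joinE_cons, ih]
      simp [aRowStep, placeRow, String.append_assoc]

-- A's per-category block equals B's catBlock
theorem cat_step_eq (places : List (String × List (List (String × String)))) (blocks : List String) (kh : String × String) :
    aCatStep places blocks kh = blocks ++ [catBlock places kh.1 kh.2] := by
  unfold aCatStep catBlock
  by_cases h : (PySem.Dict.mk places).getD kh.1 [] = []
  · simp [h, String.append_assoc]
  · have hlen : 0 < ((PySem.Dict.mk places).getD kh.1 []).length := List.length_pos_iff.mpr h
    simp [h, hlen, rows_eq, String.empty_append, String.append_assoc]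

-- A's cat_blocks loop is a map
theorem cat_fold_eq (places : List (String × List (List (String × String)))) (cats : List (String × String)) :
    cats.foldl (aCatStep places) [] = cats.map (fun kh => catBlock places kh.1 kh.2) := by
  have : aCatStep places = fun blocks kh => blocks ++ [catBlock places kh.1 kh.2] :=
    funext fun blocks => funext fun kh => cat_step_eq places blocks kh
  rw [this, PySem.List.foldl_append_singleton_eq_map, List.nil_append]

-- A's prebuilt groups dict looked up at any vibe = B's on-the-fly filter of PLACE_CATEGORIES
theorem getD_groupsA (vibe : String) :
    groupsA.getD vibe [] =
      (placeCategories.filter (fun t => t.2.2 == vibe)).map (fun t => (t.1, t.2.1)) := by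
  unfold groupsA
  have h0 : ∀ (l : List String) (d : PySem.Dict String (List (String × String))),
      d.getD vibe [] = [] → (l.foldl (fun g v => g.insert v ([] : List (String × String))) d).getD vibe [] = [] := by
    intro l
    induction l with
    | nil => intro d h; exact h
    | cons v vs ih =>
        intro d h
        refine ih _ ?_
        rw [PySem.Dict.getD_insert]
        split_ifs
        · rfl
        · exact h
  have hrw : placeCategories.foldl (fun g t => g.modify t.2.2 [] (fun l => l ++ [(t.1, t.2.1)]))
        (vibeGroupOrder.foldl (fun g v => g.insert v []) PySem.Dict.empty)
      = (placeCategories.map (fun t => (t.2.2, (t.1, t.2.1)))).foldl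
          (fun g p => g.modify p.1 [] (fun l => l ++ [p.2]))
          (vibeGroupOrder.foldl (fun g v => g.insert v []) PySem.Dict.empty) := by
    rw [List.foldl_map]
  rw [hrw, PySem.Dict.getD_foldl_modify_append,
      h0 _ _ (by simp [PySem.Dict.getD_empty]), List.filter_map, List.map_map]
  rfl

theorem groupBlock_empty (places : List (String × List (List (String × String)))) (vibe : String)
    (h : (placeCategories.filter (fun t => t.2.2 == vibe)).map (fun t => (t.1, t.2.1)) = []) :
    groupBlock places vibe = "" := by
  unfold groupBlock; simp [h]

theorem group_step_eq (places : List (String × List (List (String × String)))) (parts : List String) (vibe : String) :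
    aGroupStep places parts vibe =
      if (placeCategories.filter (fun t => t.2.2 == vibe)).map (fun t => (t.1, t.2.1)) = []
      then parts else parts ++ [groupBlock places vibe] := by
  unfold aGroupStep groupBlock
  rw [getD_groupsA]
  by_cases h : (placeCategories.filter (fun t => t.2.2 == vibe)).map (fun t => (t.1, t.2.1)) = []
  · simp [h]
  · simp [h, cat_fold_eq]

theorem outer_fold_eq (places : List (String × List (List (String × String)))) (l : List String) :
    ∀ acc : List String,
      PySem.Str.join "" (l.foldl (aGroupStep places) acc) =
        PySem.Str.join "" acc ++ PySem.Str.join "" (l.map (groupBlock places)) := by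
  induction l with
  | nil => intro acc; simp [joinE_nil]
  | cons v vs ih =>
      intro acc
      simp only [List.foldl_cons, List.map_cons, joinE_cons, group_step_eq]
      by_cases h : (placeCategories.filter (fun t => t.2.2 == v)).map (fun t => (t.1, t.2.1)) = []
      · rw [if_pos h, ih, groupBlock_empty places v h, String.empty_append]
      · rw [if_neg h, ih]
        have : PySem.Str.join "" (acc ++ [groupBlock places v]) =
            PySem.Str.join "" acc ++ groupBlock places v := by
          induction acc with
          | nil => simp [joinE_nil, joinE_cons, String.empty_append, String.append_empty]
          | cons a as iha => simp only [List.cons_append, joinE_cons, iha, String.append_assoc]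
        rw [this, String.append_assoc]

theorem eq_all (places : List (String × List (List (String × String)))) :
    places_html places = places_html_alt places := by
  by_cases hp : places = []
  · simp [places_html, places_html_alt, hp]
  · unfold places_html places_html_alt
    rw [if_neg hp, if_neg hp]
    simp only [outer_fold_eq, joinE_nil, String.empty_append]

-- ===== VERDICT =====
theorem places_html_spec : Claim_equal_places_html := by
  intro places _ _
  unfold Spec_places_html
  exact eq_all places
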